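-- pv_equiv track=rewrite | github.com/yacin999/vehicle-routing-problem-webapp | src/vrp_solver/solver.py | devide_routes
-- ===== SOURCE A (Python) =====
-- def devide_routes(arcs):
--     routes = {}
--     routeIndex = 1
--     for arc in arcs:
--         if arc[0] == 0:
--             routes["route_{}".format(routeIndex)] = [arc]
--             routeIndex = routeIndex+1
--
--     for key in routes:
--         next = routes[key][0][1]
--         i = 0
--
--         while True:
--             if next == arcs[i][0]:
--                 routes[key].append(arcs[i])
--                 next = arcs[i][1]
--
--                 if arcs[i][1] == 0:
--                     break
--             i = i+1
--             if i >= len(arcs):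
--                 i = 0
--     return routes
-- ===== SOURCE B (Python) =====
-- def devide_routes(arcs):
--     # Index the first arc leaving each node (the depot's entry is the first depot arc),
--     # then follow successor links by direct lookup instead of rescanning the arc list.
--     succ = {}
--     for arc in arcs:
--         if arc[0] not in succ:
--             succ[arc[0]] = arc
--     routes = {}
--     idx = 1
--     for arc in arcs:
--         if arc[0] == 0:
--             route = [arc]
--             nxt = arc[1]
--             while True:
--                 a = succ[nxt]
--                 route.append(a)
--                 nxt = a[1]
--                 if nxt == 0:
--                     break
--             routes["route_{}".format(idx)] = route
--             idx += 1
--     return routes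
-- ===== Notes on version B (the rewrite author's own statement) =====
-- stated objective: alternative
-- what changed: B builds a dictionary mapping each node to the first arc leaving it once and follows each route's successor links by direct lookup, instead of A's repeated cyclic rescans of the whole arc list for every hop.
import Mathlib
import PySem

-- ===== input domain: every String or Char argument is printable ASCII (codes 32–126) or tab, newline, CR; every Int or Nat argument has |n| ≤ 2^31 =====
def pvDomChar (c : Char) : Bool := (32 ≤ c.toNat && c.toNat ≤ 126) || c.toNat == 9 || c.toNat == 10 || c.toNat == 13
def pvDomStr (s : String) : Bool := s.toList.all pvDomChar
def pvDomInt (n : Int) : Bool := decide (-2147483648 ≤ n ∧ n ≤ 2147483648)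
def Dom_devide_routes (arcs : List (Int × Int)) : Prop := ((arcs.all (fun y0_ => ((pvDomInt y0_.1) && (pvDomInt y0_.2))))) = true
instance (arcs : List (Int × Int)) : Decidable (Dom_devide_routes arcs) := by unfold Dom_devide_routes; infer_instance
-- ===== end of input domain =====

-- B replaces A's repeated cyclic rescans of the arc list (one scan per hop) by a
-- node → first-outgoing-arc dictionary built once, following each route's successor links
-- by direct lookup.

-- ===== PORT A =====
-- A's inner `while True` loop: scan arcs cyclically from index i for an arc starting at `next`,
-- append it, stop when an arc ending at the depot (0) is appended.  Python's loop has no bound;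
-- the fuel only makes the port total — under Pre_ it is proved never to run out.
def aInner (arcs : List (Int × Int)) (next : Int) (i : Int) (route : List (Int × Int)) :
    Nat → List (Int × Int)
  | 0 => route
  | fuel + 1 =>
    match PySem.List.pyGet? arcs i with
    | none => route   -- IndexError (unreachable: 0 ≤ i < len(arcs) throughout)
    | some a =>
      if next = a.1 then
        if a.2 = 0 then route ++ [a]
        else aInner arcs a.2 (if i + 1 ≥ (arcs.length : Int) then 0 else i + 1) (route ++ [a]) fuel
      else aInner arcs next (if i + 1 ≥ (arcs.length : Int) then 0 else i + 1) route fuel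

def devide_routes (arcs : List (Int × Int)) : List (String × List (Int × Int)) :=
  -- first loop: routes["route_k"] = [arc] for each arc leaving the depot
  let st := arcs.foldl
    (fun (st : PySem.Dict String (List (Int × Int)) × Int) arc =>
      if arc.1 = 0 then (st.1.insert ("route_" ++ PySem.Int.toStr st.2) [arc], st.2 + 1) else st)
    (PySem.Dict.empty, 1)
  let routes := st.1
  -- second loop: for key in routes: follow successors, appending into routes[key]
  let final := routes.keys.foldl
    (fun r key =>
      let cur := r.getD key []
      let nxt := match PySem.List.pyGet? cur 0 with | some a => a.2 | none => 0  -- routes[key][0][1]; cur ≠ [] always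
      r.insert key (aInner arcs nxt 0 cur ((arcs.length + 1) * (arcs.length + 1))))
    routes
  final.items

-- ===== PORT B =====
-- B's `while True` loop: look the next arc up, append it, stop once back at the depot.  The fuel
-- len(arcs)+1 only makes the port total; under Pre_ it is proved sufficient.
def bFollow (succ : PySem.Dict Int (Int × Int)) (nxt : Int) (route : List (Int × Int)) :
    Nat → List (Int × Int)
  | 0 => route
  | fuel + 1 =>
    match succ.get? nxt with
    | none => route   -- KeyError (outside Pre_)
    | some a =>
      if a.2 = 0 then route ++ [a]
      else bFollow succ a.2 (route ++ [a]) fuel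

def devide_routes_alt (arcs : List (Int × Int)) : List (String × List (Int × Int)) :=
  let succ := arcs.foldl (fun d a => if d.contains a.1 then d else d.insert a.1 a)
    (PySem.Dict.empty : PySem.Dict Int (Int × Int))
  let st := arcs.foldl
    (fun (st : PySem.Dict String (List (Int × Int)) × Int) arc =>
      if arc.1 = 0 then
        (st.1.insert ("route_" ++ PySem.Int.toStr st.2) (bFollow succ arc.2 [arc] (arcs.length + 1)),
         st.2 + 1)
      else st)
    (PySem.Dict.empty, 1)
  st.1.items

-- ===== PRECONDITION & SPEC =====
-- pvNext: the successor-chain step of the input graph — from a non-depot node x, move to the end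
-- of the first arc leaving x; stay put if no arc leaves x; the depot is absorbing.
def pvNext (arcs : List (Int × Int)) (x : Int) : Int :=
  if x = 0 then 0
  else match arcs.find? (fun a => a.1 = x) with
       | some b => b.2
       | none => x

-- Pre_ excludes (a) inputs on which A's unbounded cyclic scan never returns — some route's
-- successor chain never reaches the depot (a dangling end or a cycle), where B raises KeyError or
-- itself loops — and (b) inputs with duplicate non-depot start nodes, where the arc A appends
-- depends on its scan position while B's first-indexed arc is an equally defensible reading.
def Pre_devide_routes (arcs : List (Int × Int)) : Prop :=
  ((arcs.filter (fun a => a.1 ≠ 0)).map Prod.fst).Nodup ∧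
  (∀ a ∈ arcs, a.1 = 0 → (pvNext arcs)^[arcs.length] a.2 = 0)
instance (arcs : List (Int × Int)) : Decidable (Pre_devide_routes arcs) := by
  unfold Pre_devide_routes; infer_instance

def pvWitness_devide_routes : (List (Int × Int)) := [(0, 1), (1, 2), (2, 0), (0, 3), (3, 0)]

def Spec_devide_routes (arcs : List (Int × Int)) (out : List (String × List (Int × Int))) : Prop := out = devide_routes_alt arcs
instance (arcs : List (Int × Int)) (out : List (String × List (Int × Int))) : Decidable (Spec_devide_routes arcs out) := by unfold Spec_devide_routes; infer_instance

-- ===== CLAIM (what is proved, stated in full; the proofs are below) =====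
def Claim_equal_devide_routes : Prop := ∀ (arcs : List (Int × Int)), Dom_devide_routes arcs → Pre_devide_routes arcs → Spec_devide_routes arcs (devide_routes arcs)

-- ===== LEMMAS AND PROOFS =====

-- The chain of arcs followed from node x: each arc continues at the previous arc's end,
-- stopping with the arc that returns to the depot.
inductive PvChain (arcs : List (Int × Int)) : Int → List (Int × Int) → Prop
  | last (a : Int × Int) : a ∈ arcs → a.2 = 0 → PvChain arcs a.1 [a]
  | cons (a : Int × Int) (l : List (Int × Int)) :
      a ∈ arcs → a.2 ≠ 0 → PvChain arcs a.2 l → PvChain arcs a.1 (a :: l)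

-- map a function over all values of a dict
def pvMapVals (F : List (Int × Int) → List (Int × Int))
    (d : PySem.Dict String (List (Int × Int))) : PySem.Dict String (List (Int × Int)) :=
  PySem.Dict.mk (d.items.map (fun p => (p.1, F p.2)))

def pvKey (c : Int) : String := "route_" ++ PySem.Int.toStr c

-- A's first loop body / B's second loop body
def pvFA (st : PySem.Dict String (List (Int × Int)) × Int) (arc : Int × Int) :
    PySem.Dict String (List (Int × Int)) × Int :=
  if arc.1 = 0 then (st.1.insert (pvKey st.2) [arc], st.2 + 1) else st

def pvFB (G : (Int × Int) → List (Int × Int))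
    (st : PySem.Dict String (List (Int × Int)) × Int) (arc : Int × Int) :
    PySem.Dict String (List (Int × Int)) × Int :=
  if arc.1 = 0 then (st.1.insert (pvKey st.2) (G arc), st.2 + 1) else st

-- A's second-loop body as a function of the stored value
def pvStep (F : List (Int × Int) → List (Int × Int))
    (r : PySem.Dict String (List (Int × Int))) (key : String) :
    PySem.Dict String (List (Int × Int)) :=
  r.insert key (F (r.getD key []))

def pvHeadEnd (v : List (Int × Int)) : Int :=
  match PySem.List.pyGet? v 0 with | some a => a.2 | none => 0

def pvF (arcs : List (Int × Int)) (v : List (Int × Int)) : List (Int × Int) :=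
  aInner arcs (pvHeadEnd v) 0 v ((arcs.length + 1) * (arcs.length + 1))

def pvSucc (arcs : List (Int × Int)) : PySem.Dict Int (Int × Int) :=
  arcs.foldl (fun d a => if d.contains a.1 then d else d.insert a.1 a) PySem.Dict.empty

def pvG (arcs : List (Int × Int)) (arc : Int × Int) : List (Int × Int) :=
  bFollow (pvSucc arcs) arc.2 [arc] (arcs.length + 1)

lemma pv_nodup_map {α β : Type} (f : α → β) (l : List α) (h : (l.map f).Nodup)
    {p q : α} (hp : p ∈ l) (hq : q ∈ l) (hf : f p = f q) : p = q := by
  induction l with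
  | nil => simp at hp
  | cons a t ih =>
    simp only [List.map_cons, List.nodup_cons] at h
    rcases List.mem_cons.1 hp with rfl | hp' <;> rcases List.mem_cons.1 hq with rfl | hq'
    · rfl
    · exact absurd (hf ▸ List.mem_map_of_mem hq') h.1
    · exact absurd (hf ▸ List.mem_map_of_mem hp') h.1
    · exact ih h.2 hp' hq'

lemma pv_two_le_countP (p : Int × Int → Bool) (l : List (Int × Int)) (j k : Nat)
    (hjk : j < k) (hk : k < l.length) (hpj : p l[j]) (hpk : p l[k]) : 2 ≤ l.countP p := by
  have hj : j < l.length := lt_trans hjk hk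
  have hsplit : l = l.take k ++ l.drop k := (List.take_append_drop k l).symm
  have hdrop : l.drop k = l[k] :: l.drop (k + 1) := List.drop_eq_getElem_cons hk
  have h1 : 0 < (l.take k).countP p := by
    rw [List.countP_pos_iff]
    refine ⟨l[j], ?_, hpj⟩
    have hjt : j < (l.take k).length := by simp; omega
    have : (l.take k)[j]'hjt = l[j] := List.getElem_take
    exact this ▸ List.getElem_mem hjt
  have h2 : 0 < (l.drop k).countP p := by
    rw [hdrop, List.countP_cons, if_pos hpk]
    omega
  have h3 : l.countP p = (l.take k).countP p + (l.drop k).countP p := by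
    conv_lhs => rw [hsplit]
    exact List.countP_append ..
  omega

lemma pv_countP_start (arcs : List (Int × Int)) (x : Int)
    (h2 : ((arcs.filter (fun a => a.1 ≠ 0)).map Prod.fst).Nodup) (hx : x ≠ 0) :
    arcs.countP (fun a => a.1 = x) ≤ 1 := by
  have hcount : (arcs.filter (fun a => a.1 ≠ 0)).countP (fun a => Prod.fst a == x) ≤ 1 := by
    have h := List.nodup_iff_count_le_one.1 h2 x
    rwa [List.count_eq_countP, List.countP_map] at h
  rw [List.countP_filter] at hcount
  calc arcs.countP (fun a => a.1 = x)
      = arcs.countP (fun a => (Prod.fst a == x) && decide (a.1 ≠ 0)) := by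
        apply List.countP_congr; intro a _
        by_cases h : a.1 = x
        · simp [h, hx]
        · simp [h]
    _ ≤ 1 := hcount

lemma pv_start_pos_uniq (arcs : List (Int × Int)) (x : Int)
    (h2 : ((arcs.filter (fun a => a.1 ≠ 0)).map Prod.fst).Nodup) (hx : x ≠ 0)
    (j k : Nat) (hj : j < arcs.length) (hk : k < arcs.length)
    (hjx : arcs[j].1 = x) (hkx : arcs[k].1 = x) : j = k := by
  by_contra hne
  have hc := pv_countP_start arcs x h2 hx
  rcases Nat.lt_or_ge j k with h | h
  · have := pv_two_le_countP (fun a => a.1 = x) arcs j k h hk (by simp [hjx]) (by simp [hkx])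
    omega
  · have hlt : k < j := by omega
    have := pv_two_le_countP (fun a => a.1 = x) arcs k j hlt hj (by simp [hkx]) (by simp [hjx])
    omega

-- B's first-wins fold computes List.find? on each key
lemma pv_foldFW_get? :
    ∀ (l : List (Int × Int)) (d : PySem.Dict Int (Int × Int)) (x : Int),
      (l.foldl (fun d a => if d.contains a.1 then d else d.insert a.1 a) d).get? x =
        (match d.get? x with
         | some v => some v
         | none => l.find? (fun a => a.1 = x)) := by
  intro l
  induction l with
  | nil => intro d x; cases hdx : d.get? x <;> simp [hdx]
  | cons a t ih =>
    intro d x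
    simp only [List.foldl_cons]
    rw [ih]
    by_cases hc : d.contains a.1
    · rw [if_pos hc]
      cases hdx : d.get? x with
      | some v => rfl
      | none =>
        have hax : a.1 ≠ x := by
          intro h
          rw [h] at hc
          rw [PySem.Dict.contains_eq_isSome_get?, hdx] at hc
          simp at hc
        rw [List.find?_cons_of_neg (by simpa using hax)]
    · rw [if_neg hc]
      rw [PySem.Dict.get?_insert]
      by_cases hxa : x = a.1
      · have hdx : d.get? x = none := by
          rw [PySem.Dict.contains_eq_isSome_get?] at hc
          rw [hxa]
          cases h : d.get? a.1 with
          | none => rfl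
          | some v => rw [h] at hc; simp at hc
        rw [if_pos hxa, hdx, List.find?_cons_of_pos (by simp [hxa])]
      · rw [if_neg hxa]
        cases hdx : d.get? x with
        | some v => rfl
        | none =>
          rw [List.find?_cons_of_neg (by simpa using fun h => hxa h.symm)]

lemma pv_succ_find (arcs : List (Int × Int)) (x : Int) :
    (pvSucc arcs).get? x = arcs.find? (fun a => a.1 = x) := by
  rw [pvSucc, pv_foldFW_get?]
  rfl

-- with no duplicate non-depot starts, find? at a non-depot key returns the unique arc there
lemma pv_find_unique (arcs : List (Int × Int))
    (h2 : ((arcs.filter (fun a => a.1 ≠ 0)).map Prod.fst).Nodup)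
    (a : Int × Int) (ha : a ∈ arcs) (ha1 : a.1 ≠ 0) :
    arcs.find? (fun b => b.1 = a.1) = some a := by
  have hsome : (arcs.find? (fun b => b.1 = a.1)).isSome := by
    rw [List.find?_isSome]
    exact ⟨a, ha, by simp⟩
  obtain ⟨c, hfc⟩ := Option.isSome_iff_exists.1 hsome
  have hcmem : c ∈ arcs := List.mem_of_find?_eq_some hfc
  have hc1 : c.1 = a.1 := by have := List.find?_some hfc; simpa using this
  have hac : a = c := by
    apply pv_nodup_map Prod.fst (arcs.filter (fun b => b.1 ≠ 0)) h2
    · exact List.mem_filter.2 ⟨ha, by simpa using ha1⟩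
    · exact List.mem_filter.2 ⟨hcmem, by simp [hc1]; simpa using ha1⟩
    · exact hc1.symm
  rw [hfc, hac]

lemma pv_succ_get (arcs : List (Int × Int))
    (h2 : ((arcs.filter (fun a => a.1 ≠ 0)).map Prod.fst).Nodup)
    (a : Int × Int) (ha : a ∈ arcs) (ha1 : a.1 ≠ 0) :
    (pvSucc arcs).get? a.1 = some a := by
  rw [pv_succ_find]
  exact pv_find_unique arcs h2 a ha ha1

-- find? returns the element at the first matching position
lemma pv_find_index (l : List (Int × Int)) (p : (Int × Int) → Bool) (c : Int × Int)
    (h : l.find? p = some c) :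
    ∃ j, ∃ hj : j < l.length, l[j] = c ∧ ∀ k (_ : k < l.length), k < j → ¬ p l[k] := by
  induction l with
  | nil => simp at h
  | cons a t ih =>
    by_cases hpa : p a
    · rw [List.find?_cons_of_pos hpa] at h
      have : a = c := by simpa using h
      exact ⟨0, by simp, by simpa using this, fun k hk hk0 => by omega⟩
    · rw [List.find?_cons_of_neg hpa] at h
      obtain ⟨j, hj, hgc, hmiss⟩ := ih h
      refine ⟨j + 1, by simp; omega, by simpa using hgc, ?_⟩
      intro k hk hkj
      cases k with
      | zero => simpa using hpa
      | succ k' => simpa using hmiss k' (by simp at hk; omega) (by omega)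

-- one unfolding of B's loop
lemma pv_bFollow_succ (succ : PySem.Dict Int (Int × Int)) (nxt : Int)
    (route : List (Int × Int)) (fuel : Nat) :
    bFollow succ nxt route (fuel + 1) =
      (match succ.get? nxt with
       | none => route
       | some a => if a.2 = 0 then route ++ [a] else bFollow succ a.2 (route ++ [a]) fuel) := rfl

lemma pv_bFollow_chain (arcs : List (Int × Int))
    (h2 : ((arcs.filter (fun a => a.1 ≠ 0)).map Prod.fst).Nodup)
    (l : List (Int × Int)) (x : Int) (hC : PvChain arcs x l) : x ≠ 0 →
    ∀ (acc : List (Int × Int)) (fuel : Nat),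
      bFollow (pvSucc arcs) x acc (fuel + l.length) = acc ++ l := by
  induction hC with
  | last a haa ha2 =>
    intro hx acc fuel
    have hget := pv_succ_get arcs h2 a haa hx
    show bFollow (pvSucc arcs) a.1 acc (fuel + 1) = acc ++ [a]
    rw [pv_bFollow_succ, hget]
    simp [ha2]
  | cons a l haa ha2 _ ih =>
    intro hx acc fuel
    have hget := pv_succ_get arcs h2 a haa hx
    show bFollow (pvSucc arcs) a.1 acc (fuel + (l.length + 1)) = acc ++ (a :: l)
    have harith : fuel + (l.length + 1) = (fuel + l.length) + 1 := by omega
    rw [harith, pv_bFollow_succ, hget]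
    simp only [if_neg ha2]
    rw [ih ha2 (acc ++ [a]) fuel]
    simp

-- one step of A's inner loop at an in-range index
lemma pv_aInner_step (arcs : List (Int × Int)) (x : Int) (i : Nat) (hi : i < arcs.length)
    (fuel : Nat) (acc : List (Int × Int)) :
    aInner arcs x (i : Int) acc (fuel + 1) =
      if x = arcs[i].1 then
        (if arcs[i].2 = 0 then acc ++ [arcs[i]]
         else aInner arcs arcs[i].2 (((if i + 1 ≥ arcs.length then 0 else i + 1 : Nat)) : Int)
           (acc ++ [arcs[i]]) fuel)
      else aInner arcs x (((if i + 1 ≥ arcs.length then 0 else i + 1 : Nat)) : Int) acc fuel := by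
  have hg : PySem.List.pyGet? arcs (i : Int) = some arcs[i] := by
    rw [PySem.List.pyGet?_natCast]; exact List.getElem?_eq_getElem hi
  have hcast : (if (i : Int) + 1 ≥ (arcs.length : Int) then 0 else (i : Int) + 1)
      = (((if i + 1 ≥ arcs.length then 0 else i + 1 : Nat)) : Int) := by
    by_cases h : i + 1 ≥ arcs.length
    · rw [if_pos h, if_pos (by omega)]; simp
    · rw [if_neg h, if_neg (by omega)]; push_cast; ring
  rw [aInner, hg]
  simp only [hcast]

-- A's scan from i ≤ j reaches the match at j when no position below j matches
lemma pv_scanL1 (arcs : List (Int × Int)) (x : Int) (j : Nat) (hj : j < arcs.length)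
    (hjx : arcs[j].1 = x)
    (hmiss : ∀ k (_ : k < arcs.length), k < j → arcs[k].1 ≠ x) :
    ∀ (d i : Nat), i + d = j → ∀ (fuel : Nat) (acc : List (Int × Int)),
      aInner arcs x (i : Int) acc (fuel + d + 1) =
        (if arcs[j].2 = 0 then acc ++ [arcs[j]]
         else aInner arcs arcs[j].2 (((if j + 1 ≥ arcs.length then 0 else j + 1 : Nat)) : Int)
           (acc ++ [arcs[j]]) fuel) := by
  intro d
  induction d with
  | zero =>
    intro i hij fuel acc
    have hi : i = j := by omega
    subst hi
    rw [pv_aInner_step arcs x i hj (fuel + 0) acc, if_pos hjx.symm]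
    norm_num
  | succ d ihd =>
    intro i hij fuel acc
    have hi : i < arcs.length := by omega
    have hne : ¬(x = arcs[i].1) := by
      intro hcontra
      exact hmiss i hi (by omega) hcontra.symm
    have harith : fuel + (d + 1) + 1 = (fuel + d + 1) + 1 := by omega
    rw [harith, pv_aInner_step arcs x i hi (fuel + d + 1) acc, if_neg hne,
      if_neg (show ¬(i + 1 ≥ arcs.length) by omega)]
    exact ihd (i + 1) (by omega) fuel acc

lemma pv_scanL2 (arcs : List (Int × Int)) (x : Int) :
    ∀ (d i : Nat), i + d = arcs.length → 1 ≤ d →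
      (∀ k (hk : k < arcs.length), i ≤ k → arcs[k].1 ≠ x) →
      ∀ (fuel : Nat) (acc : List (Int × Int)),
        aInner arcs x (i : Int) acc (fuel + d) = aInner arcs x 0 acc fuel := by
  intro d
  induction d with
  | zero => omega
  | succ d ihd =>
    intro i hij hd hmiss fuel acc
    have hi : i < arcs.length := by omega
    have hne : ¬(x = arcs[i].1) := fun h => hmiss i hi le_rfl h.symm
    have harith : fuel + (d + 1) = (fuel + d) + 1 := by omega
    rw [harith, pv_aInner_step arcs x i hi (fuel + d) acc, if_neg hne]
    rcases Nat.eq_zero_or_pos d with hd0 | hdpos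
    · subst hd0
      rw [if_pos (show i + 1 ≥ arcs.length by omega)]
      norm_num
    · rw [if_neg (show ¬(i + 1 ≥ arcs.length) by omega)]
      exact ihd (i + 1) (by omega) hdpos (fun k hk hik => hmiss k hk (by omega)) fuel acc

lemma pv_scanFind (arcs : List (Int × Int)) (x : Int) (a : Int × Int)
    (h2 : ((arcs.filter (fun a => a.1 ≠ 0)).map Prod.fst).Nodup)
    (hx : x ≠ 0) (ha : a ∈ arcs) (ha1 : a.1 = x) (i : Nat) (hi : i < arcs.length) :
    ∃ d i', d ≤ arcs.length ∧ i' < arcs.length ∧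
      ∀ (fuel : Nat) (acc : List (Int × Int)),
        aInner arcs x (i : Int) acc (fuel + d + 1) =
          (if a.2 = 0 then acc ++ [a] else aInner arcs a.2 (i' : Int) (acc ++ [a]) fuel) := by
  obtain ⟨j, hj, hja⟩ := List.mem_iff_getElem.1 ha
  have hjx : arcs[j].1 = x := by rw [hja, ha1]
  have huniq : ∀ k (hk : k < arcs.length), arcs[k].1 = x → k = j :=
    fun k hk hkx => pv_start_pos_uniq arcs x h2 hx k j hk hj hkx hjx
  have hmiss : ∀ k (_ : k < arcs.length), k < j → arcs[k].1 ≠ x := by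
    intro k hk hkj hc
    have := huniq k hk hc
    omega
  rcases Nat.lt_or_ge j i with hji | hij
  · refine ⟨(arcs.length - i) + j, if j + 1 ≥ arcs.length then 0 else j + 1,
      by omega, by split <;> omega, ?_⟩
    intro fuel acc
    have harith : fuel + ((arcs.length - i) + j) + 1 = (fuel + j + 1) + (arcs.length - i) := by
      omega
    rw [harith, pv_scanL2 arcs x (arcs.length - i) i (by omega) (by omega)
      (fun k hk hik hcontra => by have := huniq k hk hcontra; omega) (fuel + j + 1) acc]
    have hL1 := pv_scanL1 arcs x j hj hjx hmiss j 0 (by omega) fuel acc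
    rw [show (((0 : Nat)) : Int) = (0 : Int) by simp] at hL1
    rw [hL1, hja]
  · refine ⟨j - i, if j + 1 ≥ arcs.length then 0 else j + 1,
      by omega, by split <;> omega, ?_⟩
    intro fuel acc
    rw [pv_scanL1 arcs x j hj hjx hmiss (j - i) i (by omega) fuel acc, hja]

lemma pv_aInner_chain (arcs : List (Int × Int))
    (h2 : ((arcs.filter (fun a => a.1 ≠ 0)).map Prod.fst).Nodup)
    (l : List (Int × Int)) (x : Int) (hC : PvChain arcs x l) : x ≠ 0 →
    ∀ (i : Nat), i < arcs.length →
      ∃ D, D ≤ l.length * (arcs.length + 1) ∧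
        ∀ (fuel : Nat) (acc : List (Int × Int)),
          aInner arcs x (i : Int) acc (fuel + D) = acc ++ l := by
  induction hC with
  | last a haa ha2 =>
    intro hx i hi
    obtain ⟨d, i', hd, _, heq⟩ := pv_scanFind arcs a.1 a h2 hx haa rfl i hi
    refine ⟨d + 1, by simp only [List.length_singleton, one_mul]; omega, ?_⟩
    intro fuel acc
    have harith : fuel + (d + 1) = fuel + d + 1 := by omega
    rw [harith, heq fuel acc, if_pos ha2]
  | cons a l haa ha2 htail ih =>
    intro hx i hi
    obtain ⟨d, i', hd, hi'lt, heq⟩ := pv_scanFind arcs a.1 a h2 hx haa rfl i hi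
    obtain ⟨D', hD', heq'⟩ := ih ha2 i' hi'lt
    refine ⟨d + 1 + D', ?_, ?_⟩
    · have : (a :: l).length * (arcs.length + 1) = (arcs.length + 1) + l.length * (arcs.length + 1) := by
        simp only [List.length_cons]; ring
      omega
    · intro fuel acc
      have harith : fuel + (d + 1 + D') = (fuel + D') + d + 1 := by omega
      rw [harith, heq (fuel + D') acc, if_neg ha2, heq' fuel (acc ++ [a])]
      simp

-- the successor chain exists (with length bounded by the iteration count) whenever the
-- pvNext-iterate from x reaches the depot
lemma pv_chain_of_reach (arcs : List (Int × Int)) :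
    ∀ (k : Nat) (x : Int), x ≠ 0 → (pvNext arcs)^[k] x = 0 →
      ∃ l, PvChain arcs x l ∧ l.length ≤ k := by
  intro k
  induction k with
  | zero =>
    intro x hx h0
    simp only [Function.iterate_zero, id] at h0
    exact absurd h0 hx
  | succ k ih =>
    intro x hx h0
    rw [Function.iterate_succ_apply] at h0
    rcases hfind : arcs.find? (fun a => a.1 = x) with _ | b
    · have hstep : pvNext arcs x = x := by
        unfold pvNext; rw [if_neg hx, hfind]
      rw [hstep] at h0
      obtain ⟨l, hC, hlen⟩ := ih x hx h0
      exact ⟨l, hC, by omega⟩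
    · have hb : b ∈ arcs := List.mem_of_find?_eq_some hfind
      have hb1 : b.1 = x := by
        have := List.find?_some hfind
        simpa using this
      have hstep : pvNext arcs x = b.2 := by
        unfold pvNext; rw [if_neg hx, hfind]
      rw [hstep] at h0
      rcases eq_or_ne b.2 0 with hb2 | hb2
      · refine ⟨[b], ?_, by simp⟩
        have := PvChain.last (arcs := arcs) b hb hb2
        rwa [hb1] at this
      · obtain ⟨l, hC, hlen⟩ := ih b.2 hb2 h0
        refine ⟨b :: l, ?_, by simp; omega⟩
        have := PvChain.cons (arcs := arcs) b l hb hb2 hC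
        rwa [hb1] at this

lemma pv_get?_mk_append (done rest : List (String × List (Int × Int))) (k : String)
    (h : k ∉ done.map Prod.fst) :
    (PySem.Dict.mk (done ++ rest)).get? k = (PySem.Dict.mk rest).get? k := by
  induction done with
  | nil => rfl
  | cons p t ih =>
    simp only [List.map_cons, List.mem_cons, not_or] at h
    rw [List.cons_append, PySem.Dict.get?_mk_cons, if_neg (by simpa using fun hc => h.1 hc.symm)]
    exact ih (by simpa using h.2)

lemma pv_getD_mk_middle (done rest : List (String × List (Int × Int))) (k : String)
    (v : List (Int × Int)) (h : k ∉ done.map Prod.fst) :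
    (PySem.Dict.mk (done ++ (k, v) :: rest)).getD k [] = v := by
  rw [PySem.Dict.getD_eq_get?_getD, pv_get?_mk_append done _ k h, PySem.Dict.get?_mk_cons,
    if_pos (by simp)]
  rfl

lemma pv_insert_mk_replace (done rest : List (String × List (Int × Int))) (k : String)
    (v w : List (Int × Int)) (hdone : k ∉ done.map Prod.fst) (hrest : k ∉ rest.map Prod.fst) :
    (PySem.Dict.mk (done ++ (k, v) :: rest)).insert k w =
      PySem.Dict.mk (done ++ (k, w) :: rest) := by
  apply PySem.Dict.ext
  have hcont : (PySem.Dict.mk (done ++ (k, v) :: rest)).contains k := by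
    rw [PySem.Dict.contains_iff_mem_keys]
    show k ∈ (done ++ (k, v) :: rest).map Prod.fst
    simp
  rw [PySem.Dict.items_insert_of_contains _ _ hcont]
  show (done ++ (k, v) :: rest).map (fun p => if p.1 == k then (k, w) else p) =
    done ++ (k, w) :: rest
  rw [List.map_append, List.map_cons, if_pos (by simp)]
  congr 1
  · rw [List.map_congr_left (fun p hp => if_neg (by
      simp only [beq_iff_eq]
      exact fun hc => hdone (hc ▸ List.mem_map_of_mem hp)))]
    exact List.map_id _
  · congr 1
    rw [List.map_congr_left (fun p hp => if_neg (by
      simp only [beq_iff_eq]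
      exact fun hc => hrest (hc ▸ List.mem_map_of_mem hp)))]
    exact List.map_id _

lemma pv_update_keys (F : List (Int × Int) → List (Int × Int)) :
    ∀ (L done : List (String × List (Int × Int))),
      ((done ++ L).map Prod.fst).Nodup →
      (L.map Prod.fst).foldl (pvStep F) (PySem.Dict.mk (done ++ L)) =
        PySem.Dict.mk (done ++ L.map (fun p => (p.1, F p.2))) := by
  intro L
  induction L with
  | nil => intro done _; simp
  | cons p L' ih =>
    intro done h
    have hk : p.1 ∉ done.map Prod.fst ∧ p.1 ∉ L'.map Prod.fst := by
      rw [List.map_append, List.nodup_append] at h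
      constructor
      · exact fun hc => h.2.2 p.1 hc p.1 (by simp) rfl
      · have := h.2.1
        simp only [List.map_cons, List.nodup_cons] at this
        exact this.1
    simp only [List.map_cons, List.foldl_cons]
    have hstep : pvStep F (PySem.Dict.mk (done ++ p :: L')) p.1 =
        PySem.Dict.mk ((done ++ [(p.1, F p.2)]) ++ L') := by
      unfold pvStep
      have hp : p = (p.1, p.2) := rfl
      rw [hp] at *
      rw [pv_getD_mk_middle done L' p.1 p.2 hk.1,
        pv_insert_mk_replace done L' p.1 p.2 (F p.2) hk.1 hk.2]
      simp
    rw [hstep, ih (done ++ [(p.1, F p.2)]) (by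
      simp only [List.map_append, List.map_cons] at h ⊢
      simpa using h)]
    simp

lemma pv_mk_items (d : PySem.Dict String (List (Int × Int))) : PySem.Dict.mk d.items = d :=
  PySem.Dict.ext rfl

lemma pv_update_keys' (F : List (Int × Int) → List (Int × Int))
    (d : PySem.Dict String (List (Int × Int))) (h : d.keys.Nodup) :
    d.keys.foldl (pvStep F) d = pvMapVals F d := by
  have h2 : (([] ++ d.items).map Prod.fst).Nodup := by simpa using h
  have heq := pv_update_keys F d.items [] h2
  simp only [List.nil_append] at heq
  rw [pv_mk_items] at heq
  exact heq

lemma pv_mapVals_keys (F : List (Int × Int) → List (Int × Int))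
    (d : PySem.Dict String (List (Int × Int))) : (pvMapVals F d).keys = d.keys := by
  show (d.items.map (fun p => (p.1, F p.2))).map Prod.fst = d.items.map Prod.fst
  rw [List.map_map]
  rfl

lemma pv_mapVals_insert (F : List (Int × Int) → List (Int × Int))
    (d : PySem.Dict String (List (Int × Int))) (k : String) (v : List (Int × Int)) :
    pvMapVals F (d.insert k v) = (pvMapVals F d).insert k (F v) := by
  apply PySem.Dict.ext
  have hcont : (pvMapVals F d).contains k = d.contains k := by
    rw [PySem.Dict.contains_eq_decide_mem_keys, PySem.Dict.contains_eq_decide_mem_keys,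
      pv_mapVals_keys]
  by_cases hc : d.contains k
  · rw [show (pvMapVals F (d.insert k v)).items
        = (d.insert k v).items.map (fun p => (p.1, F p.2)) from rfl,
      PySem.Dict.items_insert_of_contains _ _ hc,
      PySem.Dict.items_insert_of_contains _ _ (by rw [hcont]; exact hc)]
    show (d.items.map fun p => if p.1 == k then (k, v) else p).map (fun p => (p.1, F p.2)) =
      (d.items.map fun p => (p.1, F p.2)).map fun p => if p.1 == k then (k, F v) else p
    rw [List.map_map, List.map_map]
    apply List.map_congr_left
    intro p _
    by_cases hpk : (p.1 == k) = true
    · simp [Function.comp, hpk]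
    · simp [Function.comp, hpk]
  · rw [show (pvMapVals F (d.insert k v)).items
        = (d.insert k v).items.map (fun p => (p.1, F p.2)) from rfl,
      PySem.Dict.items_insert_of_not_contains _ _ (by simpa using hc),
      PySem.Dict.items_insert_of_not_contains _ _ (by rw [hcont]; simpa using hc)]
    simp [pvMapVals]

lemma pv_mapcomm (F : List (Int × Int) → List (Int × Int)) (G : (Int × Int) → List (Int × Int)) :
    ∀ (l : List (Int × Int)), (∀ arc ∈ l, arc.1 = 0 → F [arc] = G arc) →
      ∀ (d : PySem.Dict String (List (Int × Int))) (c : Int),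
        l.foldl (pvFB G) (pvMapVals F d, c) =
          (pvMapVals F (l.foldl pvFA (d, c)).1, (l.foldl pvFA (d, c)).2) := by
  intro l
  induction l with
  | nil => intro _ d c; simp
  | cons arc l' ih =>
    intro hFG d c
    simp only [List.foldl_cons]
    by_cases h0 : arc.1 = 0
    · have hB : pvFB G (pvMapVals F d, c) arc = (pvMapVals F (d.insert (pvKey c) [arc]), c + 1) := by
        unfold pvFB
        rw [if_pos h0, pv_mapVals_insert, hFG arc (by simp) h0]
      have hA : pvFA (d, c) arc = (d.insert (pvKey c) [arc], c + 1) := by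
        unfold pvFA; rw [if_pos h0]
      rw [hB, hA]
      exact ih (fun a ha hz => hFG a (by simp [ha]) hz) _ _
    · have hB : pvFB G (pvMapVals F d, c) arc = (pvMapVals F d, c) := by
        unfold pvFB; rw [if_neg h0]
      have hA : pvFA (d, c) arc = (d, c) := by
        unfold pvFA; rw [if_neg h0]
      rw [hB, hA]
      exact ih (fun a ha hz => hFG a (by simp [ha]) hz) _ _

lemma pv_keys_nodup_foldA :
    ∀ (l : List (Int × Int)) (st : PySem.Dict String (List (Int × Int)) × Int),
      st.1.keys.Nodup → ((l.foldl pvFA st).1).keys.Nodup := by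
  intro l
  induction l with
  | nil => exact fun st h => h
  | cons arc l' ih =>
    intro st h
    simp only [List.foldl_cons]
    apply ih
    unfold pvFA
    split
    · exact PySem.Dict.nodup_keys_insert _ _ _ h
    · exact h

-- the two chain computations agree on every depot arc
lemma pv_FG (arcs : List (Int × Int))
    (h2 : ((arcs.filter (fun a => a.1 ≠ 0)).map Prod.fst).Nodup)
    (hreach : ∀ a ∈ arcs, a.1 = 0 → (pvNext arcs)^[arcs.length] a.2 = 0) :
    ∀ arc ∈ arcs, arc.1 = 0 → pvF arcs [arc] = pvG arcs arc := by
  intro arc harc h0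
  obtain ⟨a1, a2⟩ := arc
  simp only at h0
  subst h0
  have hn : 0 < arcs.length := List.length_pos_of_mem harc
  have hF1 : arcs.length + 1 ≤ (arcs.length + 1) * (arcs.length + 1) :=
    Nat.le_mul_of_pos_left (arcs.length + 1) (by omega)
  have hhead : pvHeadEnd [((0 : Int), a2)] = a2 := rfl
  by_cases ha2 : a2 = 0
  · -- the depot self-loop route: A rescans with next = 0 and appends the FIRST depot arc,
    -- then follows its chain; B's first-wins dictionary does exactly the same.
    subst ha2
    have hsome : (arcs.find? (fun a => a.1 = (0 : Int))).isSome := by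
      rw [List.find?_isSome]
      exact ⟨((0 : Int), (0 : Int)), harc, by simp⟩
    obtain ⟨c, hfc⟩ := Option.isSome_iff_exists.1 hsome
    have hcmem : c ∈ arcs := List.mem_of_find?_eq_some hfc
    have hc1 : c.1 = 0 := by have := List.find?_some hfc; simpa using this
    obtain ⟨j0, hj0, hgc, hmiss0⟩ := pv_find_index arcs _ c hfc
    have hjx : arcs[j0].1 = 0 := by rw [hgc, hc1]
    have hmiss : ∀ k (_ : k < arcs.length), k < j0 → arcs[k].1 ≠ 0 := by
      intro k hk hkj hc
      exact hmiss0 k hk hkj (by simpa using hc)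
    have hgetB : (pvSucc arcs).get? 0 = some c := by rw [pv_succ_find]; exact hfc
    by_cases hcz : c.2 = 0
    · -- route = [(0,0), c]
      have hA : pvF arcs [((0 : Int), 0)] = [((0 : Int), 0)] ++ [c] := by
        show aInner arcs (pvHeadEnd [((0 : Int), (0:Int))]) 0 [((0 : Int), 0)] _ = _
        rw [hhead]
        rw [show (arcs.length + 1) * (arcs.length + 1)
            = ((arcs.length + 1) * (arcs.length + 1) - (j0 + 1)) + j0 + 1 from by omega]
        have h := pv_scanL1 arcs 0 j0 hj0 hjx hmiss j0 0 (by omega)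
          ((arcs.length + 1) * (arcs.length + 1) - (j0 + 1)) [((0 : Int), 0)]
        rw [show (((0 : Nat)) : Int) = (0 : Int) by simp] at h
        rw [h, hgc, if_pos hcz]
      have hB : pvG arcs ((0 : Int), 0) = [((0 : Int), 0)] ++ [c] := by
        show bFollow (pvSucc arcs) 0 [((0 : Int), 0)] (arcs.length + 1) = _
        rw [show arcs.length + 1 = arcs.length + 1 from rfl, pv_bFollow_succ, hgetB]
        simp [hcz]
      rw [hA, hB]
    · -- route = [(0,0), c] ++ chain(c.2)
      obtain ⟨l, hC, hlen⟩ :=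
        pv_chain_of_reach arcs arcs.length c.2 hcz (hreach c hcmem hc1)
      have hDle' : l.length * (arcs.length + 1) ≤ arcs.length * (arcs.length + 1) :=
        Nat.mul_le_mul_right _ hlen
      set j0' : Nat := if j0 + 1 ≥ arcs.length then 0 else j0 + 1 with hj0'
      have hj0'lt : j0' < arcs.length := by rw [hj0']; split <;> omega
      obtain ⟨D, hD, heqA⟩ := pv_aInner_chain arcs h2 l c.2 hC hcz j0' hj0'lt
      have htot : j0 + 1 + D ≤ (arcs.length + 1) * (arcs.length + 1) := by
        have hexp : (arcs.length + 1) * (arcs.length + 1)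
            = arcs.length * (arcs.length + 1) + (arcs.length + 1) := by ring
        omega
      have hA : pvF arcs [((0 : Int), 0)] = ([((0 : Int), 0)] ++ [c]) ++ l := by
        show aInner arcs (pvHeadEnd [((0 : Int), (0:Int))]) 0 [((0 : Int), 0)] _ = _
        rw [hhead]
        rw [show (arcs.length + 1) * (arcs.length + 1)
            = (((arcs.length + 1) * (arcs.length + 1) - (j0 + 1) - D) + D) + j0 + 1 from by omega]
        have h := pv_scanL1 arcs 0 j0 hj0 hjx hmiss j0 0 (by omega)
          (((arcs.length + 1) * (arcs.length + 1) - (j0 + 1) - D) + D) [((0 : Int), 0)]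
        rw [show (((0 : Nat)) : Int) = (0 : Int) by simp] at h
        rw [h, hgc, if_neg hcz, heqA _ _]
      have hB : pvG arcs ((0 : Int), 0) = ([((0 : Int), 0)] ++ [c]) ++ l := by
        show bFollow (pvSucc arcs) 0 [((0 : Int), 0)] (arcs.length + 1) = _
        rw [show arcs.length + 1 = ((arcs.length - l.length) + l.length) + 1 from by omega,
          pv_bFollow_succ, hgetB]
        simp only [if_neg hcz]
        exact pv_bFollow_chain arcs h2 l c.2 hC hcz _ _
      rw [hA, hB]
  · -- ordinary depot arc: follow the unique chain from a2
    obtain ⟨l, hC, hlen⟩ :=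
      pv_chain_of_reach arcs arcs.length a2 ha2 (hreach (0, a2) harc rfl)
    obtain ⟨D, hD, heqA⟩ := pv_aInner_chain arcs h2 l a2 hC ha2 0 hn
    have hDle : D ≤ (arcs.length + 1) * (arcs.length + 1) :=
      calc D ≤ l.length * (arcs.length + 1) := hD
        _ ≤ arcs.length * (arcs.length + 1) := Nat.mul_le_mul_right _ hlen
        _ ≤ (arcs.length + 1) * (arcs.length + 1) := Nat.mul_le_mul_right _ (Nat.le_succ _)
    have hA : pvF arcs [((0 : Int), a2)] = [((0 : Int), a2)] ++ l := by
      have h := heqA ((arcs.length + 1) * (arcs.length + 1) - D) [((0 : Int), a2)]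
      rw [show ((arcs.length + 1) * (arcs.length + 1) - D) + D
          = (arcs.length + 1) * (arcs.length + 1) from by omega] at h
      rw [show (((0 : Nat)) : Int) = (0 : Int) by simp] at h
      show aInner arcs (pvHeadEnd [((0 : Int), a2)]) 0 [((0 : Int), a2)]
        ((arcs.length + 1) * (arcs.length + 1)) = [((0 : Int), a2)] ++ l
      rw [hhead]
      exact h
    have hB : pvG arcs ((0 : Int), a2) = [((0 : Int), a2)] ++ l := by
      have h := pv_bFollow_chain arcs h2 l a2 hC ha2 [((0 : Int), a2)]
        (arcs.length + 1 - l.length)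
      rw [show (arcs.length + 1 - l.length) + l.length = arcs.length + 1 from by omega] at h
      exact h
    rw [hA, hB]

-- ===== VERDICT (by name: the statement is the Claim_ definition above) =====
theorem devide_routes_spec : Claim_equal_devide_routes := by
  intro arcs _hdom hpre
  show devide_routes arcs = devide_routes_alt arcs
  obtain ⟨h2, hreach⟩ := hpre
  have hFG := pv_FG arcs h2 hreach
  have hroutes_nodup : ((arcs.foldl pvFA (PySem.Dict.empty, 1)).1).keys.Nodup :=
    pv_keys_nodup_foldA arcs (PySem.Dict.empty, 1) (by
      rw [show (PySem.Dict.empty : PySem.Dict String (List (Int × Int))).keys = [] from rfl]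
      exact List.nodup_nil)
  calc devide_routes arcs
      = (((arcs.foldl pvFA (PySem.Dict.empty, 1)).1).keys.foldl (pvStep (pvF arcs))
          ((arcs.foldl pvFA (PySem.Dict.empty, 1)).1)).items := rfl
    _ = (pvMapVals (pvF arcs) ((arcs.foldl pvFA (PySem.Dict.empty, 1)).1)).items := by
        rw [pv_update_keys' (pvF arcs) _ hroutes_nodup]
    _ = ((arcs.foldl (pvFB (pvG arcs)) (PySem.Dict.empty, 1)).1).items := by
        have hm := pv_mapcomm (pvF arcs) (pvG arcs) arcs hFG PySem.Dict.empty 1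
        have he : pvMapVals (pvF arcs) PySem.Dict.empty = PySem.Dict.empty :=
          PySem.Dict.ext rfl
        rw [he] at hm
        rw [hm]
    _ = devide_routes_alt arcs := rfl
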